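-- pv_equiv track=rewrite | github.com/asinggih/Advent-of-Code | py/day_06/day_06.py | marker_detector
-- ===== SOURCE A (Python) =====
-- from collections import deque
--
-- def marker_detector(datastream: list, window: int) -> int:
--
--     marker_container = deque()
--     for idx, char in enumerate(datastream):
--         if len(marker_container) == window:
--             deduped = set(marker_container)
--             if len(deduped) == window:
--                 return idx
--             marker_container.popleft()
--         marker_container.append(char)
--     return -1
-- ===== SOURCE B (Python) =====
-- def _add(counts, dups, c):
--     # record one more occurrence of c; return the updated duplicate-excess counter
--     k = counts.get(c, 0) + 1
--     counts[c] = k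
--     return dups + 1 if k >= 2 else dups
--
--
-- def marker_detector(datastream: list, window: int) -> int:
--     n = len(datastream)
--     if window < 0 or window > n - 1:
--         return -1
--     counts = {}
--     dups = 0  # number of excess (duplicate) occurrences in the current window
--     for c in datastream[:window]:
--         dups = _add(counts, dups, c)
--     for idx in range(window, n):
--         if dups == 0:
--             return idx
--         dups = _add(counts, dups, datastream[idx])
--         c = datastream[idx - window]
--         k = counts[c] - 1
--         counts[c] = k
--         if k >= 1:
--             dups -= 1
--     return -1
-- ===== Notes on version B (the rewrite author's own statement) =====
-- stated objective: faster
-- what changed: Instead of rebuilding a set() of the whole window at every position, B slides a frequency table with a running duplicate-excess counter, so each step is O(1) dict work instead of O(window).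
import Mathlib
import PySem

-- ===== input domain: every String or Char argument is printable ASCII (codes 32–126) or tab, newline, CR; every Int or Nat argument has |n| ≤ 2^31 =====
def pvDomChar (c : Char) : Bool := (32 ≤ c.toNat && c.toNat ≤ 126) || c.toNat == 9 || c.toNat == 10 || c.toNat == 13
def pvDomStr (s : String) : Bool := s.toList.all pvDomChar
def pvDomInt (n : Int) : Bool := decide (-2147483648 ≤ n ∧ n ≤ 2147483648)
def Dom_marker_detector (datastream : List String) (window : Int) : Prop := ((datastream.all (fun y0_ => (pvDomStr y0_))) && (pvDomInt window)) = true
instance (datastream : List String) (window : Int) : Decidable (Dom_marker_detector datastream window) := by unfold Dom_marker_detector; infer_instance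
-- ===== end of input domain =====

-- B replaces A's per-step set() dedup of the whole window by a sliding frequency table
-- with a running duplicate-excess counter, updated as the window slides.

-- ===== PORT A =====
-- deque → List String (popleft = drop 1, append = ++ [c]); set(cont) → PySem.Set.ofList
def markerGoA (window : Int) : List String → Int → List String → Int
  | [], _, _ => -1
  | c :: rest, idx, cont =>
    if (cont.length : Int) = window then
      if ((PySem.Set.ofList cont).length : Int) = window then idx
      else markerGoA window rest (idx + 1) (cont.drop 1 ++ [c])
    else markerGoA window rest (idx + 1) (cont ++ [c])

def marker_detector (datastream : List String) (window : Int) : Int :=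
  markerGoA window datastream 0 []

-- ===== PORT B =====
-- Source B's helper _add(counts, dups, c): the dict is threaded explicitly (Lean dicts are immutable)
def altAdd (st : PySem.Dict String Int × Int) (c : String) : PySem.Dict String Int × Int :=
  let k := st.1.getD c 0 + 1
  (st.1.insert c k, if 2 ≤ k then st.2 + 1 else st.2)

-- the 'for idx in range(window, n)' loop of Source B, with early return
def altGo (ds : List String) (window : Int) : List Int → PySem.Dict String Int × Int → Int
  | [], _ => -1
  | idx :: rest, st =>
    if st.2 = 0 then idx
    else
      let st1 := altAdd st ((PySem.List.pyGet? ds idx).getD "")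
      let cout := (PySem.List.pyGet? ds (idx - window)).getD ""
      -- counts[c] (plain lookup): the key is always present on reachable states, default unused
      let k := st1.1.getD cout 0 - 1
      altGo ds window rest (st1.1.insert cout k, if 1 ≤ k then st1.2 - 1 else st1.2)

def marker_detector_alt (datastream : List String) (window : Int) : Int :=
  let n : Int := PySem.List.len datastream
  if window < 0 ∨ window > n - 1 then -1
  else
    altGo datastream window (PySem.List.pyRange window n 1)
      ((PySem.List.slice datastream none (some window)).foldl altAdd (PySem.Dict.empty, 0))

-- ===== PRECONDITION & SPEC =====
def Spec_marker_detector (datastream : List String) (window : Int) (out : Int) : Prop := out = marker_detector_alt datastream window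
instance (datastream : List String) (window : Int) (out : Int) : Decidable (Spec_marker_detector datastream window out) := by unfold Spec_marker_detector; infer_instance

-- ===== CLAIM (what is proved, stated in full; the proofs are below) =====
def Claim_equal_marker_detector : Prop := ∀ (datastream : List String) (window : Int), Dom_marker_detector datastream window → Spec_marker_detector datastream window (marker_detector datastream window)

-- ===== LEMMAS AND PROOFS =====

-- reference recursion both programs are reduced to: slide the window, return idx at the first Nodup window
def refGo : List String → Int → List String → Int
  | [], _, _ => -1
  | c :: rest, idx, cont =>
    if cont.Nodup then idx else refGo rest (idx + 1) (cont.drop 1 ++ [c])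

-- number of excess (duplicate) occurrences in l — what B's `dups` counter holds
def excess (l : List String) : Int := (l.length : Int) - l.toFinset.card

-- B's loop invariant: counts is the frequency table of l, dups its excess
def WInv (l : List String) (st : PySem.Dict String Int × Int) : Prop :=
  (∀ s, st.1.getD s 0 = (l.count s : Int)) ∧ st.2 = excess l

lemma excess_eq_zero_iff (l : List String) : excess l = 0 ↔ l.Nodup := by
  unfold excess
  rw [List.card_toFinset]
  constructor
  · intro h
    have hs := l.dedup_sublist
    have hlen : l.dedup.length = l.length := by omega
    have heq := hs.eq_of_length hlen
    rw [← heq]; exact l.nodup_dedup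
  · intro h
    rw [List.dedup_eq_self.mpr h]; ring

lemma excess_cons (x : String) (l : List String) :
    excess (x :: l) = excess l + (if x ∈ l then 1 else 0) := by
  unfold excess
  rw [List.toFinset_cons]
  by_cases h : x ∈ l
  · rw [Finset.card_insert_of_mem (List.mem_toFinset.mpr h)]
    simp [h]; omega
  · rw [Finset.card_insert_of_notMem (fun hc => h (List.mem_toFinset.mp hc))]
    simp [h]

lemma excess_append_singleton (l : List String) (x : String) :
    excess (l ++ [x]) = excess l + (if x ∈ l then 1 else 0) := by
  unfold excess
  rw [List.toFinset_append]
  have he : l.toFinset ∪ [x].toFinset = insert x l.toFinset := by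
    rw [Finset.union_comm]; simp
  rw [he]
  by_cases h : x ∈ l
  · rw [Finset.card_insert_of_mem (List.mem_toFinset.mpr h)]
    simp [h]; omega
  · rw [Finset.card_insert_of_notMem (fun hc => h (List.mem_toFinset.mp hc))]
    simp [h]

-- len(set(l)) is the number of distinct elements of l
lemma length_ofList_eq_card (l : List String) :
    (PySem.Set.ofList l).length = l.toFinset.card := by
  rw [List.card_toFinset]
  have hperm : (PySem.Set.ofList l).Perm l.dedup := by
    rw [List.perm_ext_iff_of_nodup (PySem.Set.nodup_ofList l) l.nodup_dedup]
    intro a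
    rw [PySem.Set.mem_ofList, List.mem_dedup]
  exact hperm.length_eq

lemma card_eq_iff_nodup (l : List String) : l.toFinset.card = l.length ↔ l.Nodup := by
  rw [← excess_eq_zero_iff]
  unfold excess
  have := l.toFinset_card_le
  omega

-- one occurrence added (Source B's _add) preserves the invariant
lemma inv_altAdd {l : List String} {st : PySem.Dict String Int × Int} (h : WInv l st) (c : String) :
    WInv (l ++ [c]) (altAdd st c) := by
  obtain ⟨hc, hd⟩ := h
  unfold altAdd
  constructor
  · intro s
    rw [PySem.Dict.getD_insert]
    by_cases hs : s = c
    · subst hs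
      simp [hc s, List.count_append]
    · simp [hs, hc s, List.count_append, Ne.symm hs]
  · simp only [hc c, hd, excess_append_singleton]
    by_cases hm : c ∈ l
    · have : (1 : Int) ≤ l.count c := by exact_mod_cast List.count_pos_iff.mpr hm
      rw [if_pos (by omega), if_pos hm]
    · have : l.count c = 0 := List.count_eq_zero.mpr hm
      rw [this]
      simp [hm]

-- Source B's warm-up loop over datastream[:window] establishes the invariant
lemma inv_foldl_altAdd (p : List String) : ∀ (q : List String) (st : PySem.Dict String Int × Int),
    WInv q st → WInv (q ++ p) (p.foldl altAdd st) := by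
  induction p with
  | nil => intro q st h; simpa using h
  | cons c p ih =>
    intro q st h
    have := ih (q ++ [c]) (altAdd st c) (inv_altAdd h c)
    simpa using this

-- removing the leftmost occurrence (the slide-out step of Source B's loop) preserves the invariant
lemma inv_remove {x : String} {m : List String} {st : PySem.Dict String Int × Int}
    (h : WInv (x :: m) st) :
    WInv m (st.1.insert x (st.1.getD x 0 - 1), if 1 ≤ st.1.getD x 0 - 1 then st.2 - 1 else st.2) := by
  obtain ⟨hc, hd⟩ := h
  have hx : st.1.getD x 0 - 1 = (m.count x : Int) := by
    rw [hc x]; simp [List.count_cons_self]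
  constructor
  · intro s
    rw [PySem.Dict.getD_insert]
    by_cases hs : s = x
    · subst hs; simpa using hx
    · simp only [if_neg hs, hc s, List.count_cons]
      simp [Ne.symm hs]
  · simp only [hx, hd, excess_cons]
    by_cases hm : x ∈ m
    · have : (1 : Int) ≤ m.count x := by exact_mod_cast List.count_pos_iff.mpr hm
      rw [if_pos (by omega), if_pos hm]; ring
    · have : m.count x = 0 := List.count_eq_zero.mpr hm
      rw [this]; simp [hm]

-- a negative window never matches len(deque) — A scans to the end and returns -1
lemma A_neg (window : Int) (hw : window < 0) :
    ∀ (rest : List String) (idx : Int) (cont : List String),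
      markerGoA window rest idx cont = -1 := by
  intro rest
  induction rest with
  | nil => intro idx cont; rfl
  | cons c r ih =>
    intro idx cont
    unfold markerGoA
    rw [if_neg (by omega)]
    exact ih _ _

-- once the deque is full, A is the reference sliding recursion
lemma A_steady (w : Nat) : ∀ (rest : List String) (idx : Int) (cont : List String),
    cont.length = w → markerGoA (w : Int) rest idx cont = refGo rest idx cont := by
  intro rest
  induction rest with
  | nil => intro idx cont h; rfl
  | cons c r ih =>
    intro idx cont h
    unfold markerGoA refGo
    rw [if_pos (by exact_mod_cast congrArg Nat.cast h)]
    have hset : (((PySem.Set.ofList cont).length : Int) = (w : Int)) ↔ cont.Nodup := by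
      rw [length_ofList_eq_card]
      constructor
      · intro hh
        exact (card_eq_iff_nodup cont).mp (by omega)
      · intro hh
        have := (card_eq_iff_nodup cont).mpr hh
        omega
    by_cases hn : cont.Nodup
    · rw [if_pos (hset.mpr hn), if_pos hn]
    · rw [if_neg (fun hh => hn (hset.mp hh)), if_neg hn]
      apply ih
      have hne : cont ≠ [] := by
        intro hnil; exact hn (hnil ▸ List.nodup_nil)
      have : cont.length ≥ 1 := List.length_pos_of_ne_nil hne
      simp
      omega

-- A's warm-up: the deque fills element by element, then the steady phase starts
lemma A_ramp (w : Nat) : ∀ (rest : List String) (idx : Int) (cont : List String),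
    cont.length < w →
    markerGoA (w : Int) rest idx cont =
      if rest.length + cont.length < w then -1
      else refGo (rest.drop (w - cont.length)) (idx + ((w : Int) - cont.length))
             (cont ++ rest.take (w - cont.length)) := by
  intro rest
  induction rest with
  | nil =>
    intro idx cont h
    rw [if_pos (by simpa using h)]
    rfl
  | cons c r ih =>
    intro idx cont h
    unfold markerGoA
    rw [if_neg (by omega)]
    by_cases h2 : cont.length + 1 < w
    · rw [ih (idx + 1) (cont ++ [c]) (by simpa using h2)]
      have e2 : w - cont.length = (w - (cont ++ [c]).length) + 1 := by
        simp; omega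
      have e3 : idx + 1 + ((w : Int) - (cont ++ [c]).length) = idx + ((w : Int) - cont.length) := by
        simp; ring
      rw [e3]
      by_cases h3 : r.length + (cont ++ [c]).length < w
      · rw [if_pos h3, if_pos (by simp at h3 ⊢; omega)]
      · rw [if_neg h3, if_neg (by simp at h3 ⊢; omega)]
        rw [e2]
        simp only [List.take_succ_cons, List.drop_succ_cons]
        simp only [List.append_assoc, List.singleton_append]
    · have hw1 : cont.length + 1 = w := by omega
      rw [A_steady w r (idx + 1) (cont ++ [c]) (by simp; omega)]
      rw [if_neg (by simp; omega)]
      have e2 : w - cont.length = 1 := by omega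
      rw [e2]
      have e3 : idx + ((w : Int) - cont.length) = idx + 1 := by
        have : (w : Int) = cont.length + 1 := by exact_mod_cast congrArg Nat.cast hw1.symm
        rw [this]; ring
      rw [e3]
      rfl

-- B's main loop, from any reached index j with the invariant, is the reference recursion
lemma B_loop (ds : List String) (w : Nat) : ∀ (fuel j : Nat) (st : PySem.Dict String Int × Int),
    ds.length - j = fuel → w ≤ j → j ≤ ds.length →
    WInv ((ds.drop (j - w)).take w) st →
    altGo ds (w : Int) (PySem.List.pyRange (j : Int) (ds.length : Int) 1) st
      = refGo (ds.drop j) (j : Int) ((ds.drop (j - w)).take w) := by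
  intro fuel
  induction fuel with
  | zero =>
    intro j st hf hwj hjl hinv
    have hj : j = ds.length := by omega
    subst hj
    rw [PySem.List.pyRange_one_eq_nil (by omega)]
    rw [List.drop_length]
    rfl
  | succ fuel ih =>
    intro j st hf hwj hjl hinv
    have hjlt : j < ds.length := by omega
    rw [PySem.List.pyRange_one_cons (by exact_mod_cast hjlt)]
    set cont := (ds.drop (j - w)).take w with hcont
    have hdropj : ds.drop j = ds[j] :: ds.drop (j + 1) := List.drop_eq_getElem_cons hjlt
    obtain ⟨hc, hd⟩ := hinv
    unfold altGo
    rw [hdropj]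
    unfold refGo
    by_cases hz : st.2 = 0
    · rw [if_pos hz, if_pos (by
        rw [← excess_eq_zero_iff]; rw [hd] at hz; exact hz)]
    · rw [if_neg hz, if_neg (by
        intro hn
        exact hz (by rw [hd]; exact (excess_eq_zero_iff cont).mpr hn))]
      have hcne : cont ≠ [] := by
        intro hnil
        apply hz
        rw [hd, hnil]
        exact (excess_eq_zero_iff []).mpr List.nodup_nil
      have hw1 : 1 ≤ w := by
        rcases Nat.eq_zero_or_pos w with h0 | h1
        · exfalso; apply hcne; rw [hcont, h0]; simp
        · exact h1
      have hjwlt : j - w < ds.length := by omega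
      have hdropjw : ds.drop (j - w) = ds[j - w] :: ds.drop (j - w + 1) :=
        List.drop_eq_getElem_cons hjwlt
      have htakegen : ∀ (x : String) (l : List String), (x :: l).take w = x :: l.take (w - 1) := by
        intro x l
        conv_lhs => rw [show w = (w - 1) + 1 by omega]
        rw [List.take_succ_cons]
      have htake : cont = ds[j - w] :: (ds.drop (j - w + 1)).take (w - 1) := by
        rw [hcont, hdropjw, htakegen]
      have hcin : (PySem.List.pyGet? ds ((j : Int))).getD "" = ds[j] := by
        rw [PySem.List.pyGet?_natCast]
        simp [List.getElem?_eq_getElem hjlt]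
      have hsub : (j : Int) - (w : Int) = ((j - w : Nat) : Int) := by
        push_cast [Nat.cast_sub hwj]; ring
      have hcout : (PySem.List.pyGet? ds ((j : Int) - (w : Int))).getD "" = ds[j - w] := by
        rw [hsub, PySem.List.pyGet?_natCast]
        simp [List.getElem?_eq_getElem hjwlt]
      rw [hcin, hcout]
      have hnext : (ds.drop (j + 1 - w)).take w
          = (ds.drop (j - w + 1)).take (w - 1) ++ [ds[j]] := by
        have h1 : j + 1 - w = (j - w) + 1 := by omega
        rw [h1]
        have h2 : (ds.drop (j - w + 1)).take w = (ds.drop (j - w + 1)).take ((w - 1) + 1) := by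
          rw [Nat.sub_add_cancel hw1]
        rw [h2, List.take_add_one]
        congr 1
        rw [List.getElem?_drop]
        rw [show j - w + 1 + (w - 1) = j by omega]
        rw [List.getElem?_eq_getElem hjlt]
        rfl
      have hinv1 : WInv (cont ++ [ds[j]]) (altAdd st ds[j]) := inv_altAdd ⟨hc, hd⟩ _
      have hcons : cont ++ [ds[j]] = ds[j - w] :: ((ds.drop (j - w + 1)).take (w - 1) ++ [ds[j]]) := by
        rw [htake]; rfl
      rw [hcons] at hinv1
      have hinv2 := inv_remove hinv1
      rw [← hnext] at hinv2
      have hrec := ih (j + 1) _ (by omega) (by omega) (by omega) hinv2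
      have hcast : ((j : Int) + 1) = (((j + 1 : Nat)) : Int) := by push_cast; ring
      rw [hcast, hrec]
      congr 1
      · rw [htake]
        simp [hnext]

-- the glue: both programs equal the reference recursion in every regime of window
lemma main_eq (ds : List String) (window : Int) :
    marker_detector ds window = marker_detector_alt ds window := by
  unfold marker_detector marker_detector_alt
  simp only [PySem.List.len_eq]
  by_cases hneg : window < 0
  · rw [A_neg window hneg, if_pos (Or.inl hneg)]
  · push_neg at hneg
    lift window to ℕ using hneg with w
    by_cases hbig : (w : Int) > (ds.length : Int) - 1
    · rw [if_pos (Or.inr hbig)]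
      have hnle : ds.length ≤ w := by omega
      rcases Nat.eq_zero_or_pos w with h0 | h1
      · subst h0
        have hds : ds = [] := List.eq_nil_of_length_eq_zero (by omega)
        subst hds
        rfl
      · rw [A_ramp w ds 0 [] (by simpa using h1)]
        rcases Nat.lt_or_ge ds.length w with hlt | hge
        · rw [if_pos (by simpa using hlt)]
        · have hlen : ds.length = w := by omega
          rw [if_neg (by simp; omega)]
          rw [show w - [].length = w by simp, ← hlen, List.drop_length]
          rfl
    · rw [if_neg (by push_neg; exact ⟨by omega, by omega⟩)]
      have hwlt : w < ds.length := by omega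
      rw [PySem.List.slice_to_natCast]
      have hinv0 : WInv (ds.take w) ((ds.take w).foldl altAdd (PySem.Dict.empty, 0)) := by
        have h0 : WInv [] ((PySem.Dict.empty : PySem.Dict String Int), (0 : Int)) := by
          constructor
          · intro s; simp [PySem.Dict.getD_empty]
          · simp [excess]
        simpa using inv_foldl_altAdd (ds.take w) [] _ h0
      rw [B_loop ds w (ds.length - w) w _ rfl (le_refl w) (le_of_lt hwlt)
        (by simpa using hinv0)]
      rcases Nat.eq_zero_or_pos w with h0 | h1
      · subst h0
        rw [A_steady 0 ds 0 [] rfl]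
        simp
      · rw [A_ramp w ds 0 [] (by simpa using h1)]
        rw [if_neg (by simp; omega)]
        simp

-- ===== VERDICT (by name: the statement is the Claim_ definition above) =====
theorem marker_detector_spec : Claim_equal_marker_detector := by
  intro datastream window _
  unfold Spec_marker_detector
  exact main_eq datastream window
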